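-- pv_equiv track=rewrite | github.com/MartinDuck/cryptography_classes | lab1/tests.py | long_series
-- ===== SOURCE A (Python) =====
-- def long_series(bits: list) -> bool:
--     count = 1
--     for i in range(1, len(bits)):
--         if bits[i] == bits[i-1]:
--             count += 1
--             if count > 25:
--                 return False
--         else:
--             count = 1
--     return True
-- ===== SOURCE B (Python) =====
-- def long_series(bits: list) -> bool:
--     # Run-length encode, then check every run length is at most 25.
--     runs = []
--     for b in bits:
--         if runs and runs[-1][0] == b:
--             runs[-1][1] += 1
--         else:
--             runs.append([b, 1])
--     return all(n <= 25 for _, n in runs)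
-- ===== Notes on version B (the rewrite author's own statement) =====
-- stated objective: alternative
-- what changed: Replaces the index-based counter loop with early exit by a run-length encoding pass followed by an all(run length <= 25) test.
import Mathlib
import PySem

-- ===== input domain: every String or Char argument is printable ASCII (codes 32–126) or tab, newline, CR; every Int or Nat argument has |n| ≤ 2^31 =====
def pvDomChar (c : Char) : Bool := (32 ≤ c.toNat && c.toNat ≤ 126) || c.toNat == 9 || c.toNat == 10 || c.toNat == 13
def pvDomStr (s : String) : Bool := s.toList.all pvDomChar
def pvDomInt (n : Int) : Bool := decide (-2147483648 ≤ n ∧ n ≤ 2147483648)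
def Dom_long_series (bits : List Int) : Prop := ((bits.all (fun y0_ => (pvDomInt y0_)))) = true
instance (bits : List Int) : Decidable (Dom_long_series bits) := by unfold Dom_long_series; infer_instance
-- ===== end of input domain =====

-- B replaces A's counter loop with early exit by a run-length encoding pass then an 'every run ≤ 25' test; alternative decomposition, same cost.

-- ===== PORT A =====
-- A's loop over i in range(1, len(bits)) compares bits[i] with bits[i-1]; ported as
-- structural recursion carrying the previous element and the count, with the early
-- 'return False' as the false branch.
def long_series_go (prev : Int) (count : Int) : List Int → Bool
  | [] => true
  | b :: rest =>
    if b = prev then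
      if count + 1 > 25 then false
      else long_series_go b (count + 1) rest
    else long_series_go b 1 rest

def long_series (bits : List Int) : Bool :=
  match bits with
  | [] => true
  | b :: rest => long_series_go b 1 rest

-- ===== PORT B =====
-- Source B builds the run list by mutating its last entry; ported as a foldl keeping the
-- runs with the current run at the FRONT (reversed order; `all` is order-independent).
def long_series_step (acc : List (Int × Int)) (b : Int) : List (Int × Int) :=
  match acc with
  | (v, n) :: rest => if b = v then (v, n + 1) :: rest else (b, 1) :: (v, n) :: rest
  | [] => [(b, 1)]

def long_series_alt (bits : List Int) : Bool :=
  (bits.foldl long_series_step []).all (fun p => decide (p.2 ≤ 25))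

-- ===== PRECONDITION & SPEC =====
def Spec_long_series (bits : List Int) (out : Bool) : Prop := out = long_series_alt bits
instance (bits : List Int) (out : Bool) : Decidable (Spec_long_series bits out) := by unfold Spec_long_series; infer_instance

-- ===== CLAIM (what is proved, stated in full; the proofs are below) =====
def Claim_equal_long_series : Prop := ∀ (bits : List Int), Dom_long_series bits → Spec_long_series bits (long_series bits)

-- ===== LEMMAS AND PROOFS =====
-- once some run in the accumulator is too long, the fold stays bad
theorem long_series_bad_persists (l : List Int) (acc : List (Int × Int))
    (h : acc.all (fun p => decide (p.2 ≤ 25)) = false) :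
    (l.foldl long_series_step acc).all (fun p => decide (p.2 ≤ 25)) = false := by
  induction l generalizing acc with
  | nil => simpa using h
  | cons b l ih =>
    simp only [List.foldl_cons]
    apply ih
    match acc with
    | [] => simp at h
    | (v, n) :: rest =>
      simp only [long_series_step]
      split_ifs with hb
      · simp only [List.all_cons, Bool.and_eq_false_iff, decide_eq_false_iff_not] at h ⊢
        rcases h with h | h
        · left; omega
        · right; exact h
      · simp only [List.all_cons] at h ⊢
        simp [h]

-- invariant: A's remaining loop equals B's fold continued from the current run state
theorem long_series_inv (l : List Int) (prev count : Int) (rest : List (Int × Int))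
    (hc : count ≤ 25)
    (hr : rest.all (fun p => decide (p.2 ≤ 25)) = true) :
    long_series_go prev count l
      = (l.foldl long_series_step ((prev, count) :: rest)).all (fun p => decide (p.2 ≤ 25)) := by
  induction l generalizing prev count rest with
  | nil =>
    simp [long_series_go, List.all_cons, hr, hc]
  | cons b l ih =>
    simp only [long_series_go, List.foldl_cons, long_series_step]
    split_ifs with hb hgt
    · -- run grows past 25: A returns false, B's fold is bad forever
      subst hb
      rw [long_series_bad_persists]
      simp only [List.all_cons, Bool.and_eq_false_iff, decide_eq_false_iff_not]
      left; omega
    · subst hb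
      exact ih b (count + 1) rest (by omega) hr
    · exact ih b 1 ((prev, count) :: rest) (by omega)
        (by simp [List.all_cons, hr, hc])

-- ===== VERDICT (by name: the statement is the Claim_ definition above) =====
theorem long_series_spec : Claim_equal_long_series := by
  intro bits _
  unfold Spec_long_series long_series long_series_alt
  match bits with
  | [] => rfl
  | b :: rest =>
    simpa [long_series_step] using long_series_inv rest b 1 [] (by omega) rfl
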